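-- pv_equiv track=rewrite | github.com/Mfundo-debug/Python-practice | AshtonString.py | foo
-- ===== SOURCE A (Python) =====
-- def foo(text, k):
--     stack = [("",list(range(len(text))))]
--     while stack != []:
--         prefix,ii = stack.pop()
--         if k<len(prefix):
--             return prefix[k]
--         k -= len(prefix)
--         cs = sorted([(text[i],i+1) for i in ii if i<len(text)], reverse=True)
--         i = 0
--         while i<len(cs):
--             c = cs[i][0]
--             ii2 = [cs[i][1]]
--             j = i+1
--             while j<len(cs) and cs[j][0]==c:
--                 ii2.append(cs[j][1])
--                 j+=1
--             stack.append((prefix+c, ii2))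
--             i=j
--     return None
-- ===== SOURCE B (Python) =====
-- def foo(text, k):
--     subs = sorted({text[i:j] for i in range(len(text)) for j in range(i + 1, len(text) + 1)})
--     for s in subs:
--         if k < len(s):
--             return s[k]
--         k -= len(s)
--     return None
-- ===== Notes on version B (the rewrite author's own statement) =====
-- stated objective: simpler
-- what changed: A runs an explicit-stack trie DFS that re-sorts position groups at every node; B simply materialises the set of all distinct substrings once, sorts it, and scans the sorted list for the k-th character.
import Mathlib
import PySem

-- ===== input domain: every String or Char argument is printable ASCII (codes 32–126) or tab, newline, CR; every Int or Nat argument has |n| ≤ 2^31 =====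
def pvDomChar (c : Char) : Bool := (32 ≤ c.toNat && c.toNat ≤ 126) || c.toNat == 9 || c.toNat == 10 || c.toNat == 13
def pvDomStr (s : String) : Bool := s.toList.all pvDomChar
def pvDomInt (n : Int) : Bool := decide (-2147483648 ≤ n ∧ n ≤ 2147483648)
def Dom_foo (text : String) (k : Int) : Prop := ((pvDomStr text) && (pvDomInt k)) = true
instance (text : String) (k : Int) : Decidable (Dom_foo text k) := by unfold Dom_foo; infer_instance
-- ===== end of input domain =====

-- B replaces A's explicit-stack trie DFS (which re-sorts position groups at every node) by the
-- plain "sort the set of all distinct substrings once, then scan for the k-th character" approach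
-- (objective: simpler; not claimed faster).

-- ===== PORT A =====
def fooCharAt (cs : List Char) (i : Int) : Char := (PySem.List.pyGet? cs i).getD ' '

-- [(text[i], i+1) for i in ii if i < len(text)]

def fooPairs (cs : List Char) (ii : List Int) : List (Char × Int) :=
  (ii.filter (fun i => decide (i < (cs.length : Int)))).map (fun i => (fooCharAt cs i, i + 1))

-- cs = sorted(pairs, reverse=True)  (tuple comparison: fst then snd)

def fooCs (cs : List Char) (ii : List Int) : List (Char × Int) :=
  PySem.List.sorted2 (fooPairs cs ii) (·.1) (·.2) true

-- the inner grouping loop: runs of equal first component, in order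

def fooGroups : List (Char × Int) → List (Char × List Int)
  | [] => []
  | (c, p) :: rest =>
      (c, p :: (rest.takeWhile (fun q => q.1 == c)).map (·.2)) ::
      fooGroups (rest.dropWhile (fun q => q.1 == c))
termination_by l => l.length
decreasing_by simpa using Nat.lt_succ_of_le (List.length_dropWhile_le _ _)

def posW (n : Nat) (i : Int) : Nat := if i < (n : Int) then ((n : Int) - i).toNat else 0

def sumW (n : Nat) (ii : List Int) : Nat := (ii.map (posW n)).sum

def stackW (n : Nat) (st : List (List Char × List Int)) : Nat :=
  (st.map (fun nd => 1 + sumW n nd.2)).sum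

theorem groups_snd_flatten (l : List (Char × Int)) :
    ((fooGroups l).map (·.2)).flatten = l.map (·.2) := by
  induction l using fooGroups.induct with
  | case1 => simp [fooGroups]
  | case2 c p rest ih =>
      simp only [fooGroups, List.map_cons, List.flatten_cons, ih]
      simp [← List.map_append, List.takeWhile_append_dropWhile]

theorem groups_length (l : List (Char × Int)) : (fooGroups l).length ≤ l.length := by
  induction l using fooGroups.induct with
  | case1 => simp [fooGroups]
  | case2 c p rest ih =>
      simp only [fooGroups, List.length_cons]
      have := List.length_dropWhile_le (fun q => q.1 == c) rest
      omega

theorem sum_map_succ (f g : Int → Nat) (l : List Int) (h : ∀ x ∈ l, g x + 1 = f x) :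
    (l.map g).sum + l.length = (l.map f).sum := by
  induction l with
  | nil => simp
  | cons x t ih =>
      have hx := h x (by simp)
      have := ih (fun y hy => h y (by simp [hy]))
      simp only [List.map_cons, List.sum_cons, List.length_cons]
      omega

theorem sum_map_one_add {α : Type} (h : α → Nat) (l : List α) :
    (l.map (fun g => 1 + h g)).sum = l.length + (l.map h).sum := by
  induction l with
  | nil => simp
  | cons x t ih => simp [ih]; omega

theorem sumW_flatten (n : Nat) (L : List (List Int)) :
    sumW n L.flatten = (L.map (sumW n)).sum := by
  simp [sumW, List.map_flatten, List.sum_flatten, List.map_map]; rfl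

theorem childW_le (cs : List Char) (ii : List Int) :
    ((fooGroups (fooCs cs ii)).map (fun g => 1 + sumW cs.length g.2)).sum ≤ sumW cs.length ii := by
  set l := fooCs cs ii with hl
  set fl := ii.filter (fun i => decide (i < (cs.length : Int))) with hfl
  have h1 : ((fooGroups l).map (fun g => 1 + sumW cs.length g.2)).sum
      = (fooGroups l).length + sumW cs.length (l.map (·.2)) := by
    rw [sum_map_one_add (fun g => sumW cs.length g.2) (fooGroups l)]
    have : ((fooGroups l).map (fun g => sumW cs.length g.2)).sum
        = sumW cs.length (((fooGroups l).map (·.2)).flatten) := by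
      rw [sumW_flatten]; simp only [List.map_map]; rfl
    rw [this, groups_snd_flatten]
  have hperm : (l.map (·.2)).Perm ((fooPairs cs ii).map (·.2)) :=
    (PySem.List.sorted2_perm (fooPairs cs ii) (·.1) (·.2) true).map _
  have h2 : sumW cs.length (l.map (·.2)) = sumW cs.length ((fooPairs cs ii).map (·.2)) := by
    unfold sumW; exact (hperm.map (posW cs.length)).sum_eq
  have h3 : (fooPairs cs ii).map (·.2) = fl.map (· + 1) := by
    simp [fooPairs, List.map_map, hfl]
  have h4 : sumW cs.length (fl.map (· + 1)) + fl.length = sumW cs.length fl := by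
    unfold sumW
    rw [List.map_map]
    exact sum_map_succ (posW cs.length) (posW cs.length ∘ (· + 1)) fl (by
      intro x hx
      have hxn : x < (cs.length : Int) := by
        have := List.of_mem_filter hx; simpa using this
      simp only [Function.comp, posW]
      split_ifs <;> omega)
  have h5 : sumW cs.length fl ≤ sumW cs.length ii := by
    unfold sumW
    exact List.Sublist.sum_le_sum (List.Sublist.map _ List.filter_sublist) (fun a _ => Nat.zero_le a)
  have h6 : (fooGroups l).length ≤ fl.length := by
    have hg := groups_length l
    have hll : l.length = fl.length := by
      rw [hl, hfl]
      have hp := (PySem.List.sorted2_perm (fooPairs cs ii) (·.1) (·.2) true).length_eq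
      simp only [fooPairs, List.length_map] at hp
      exact hp
    omega
  rw [h3] at h2
  omega

theorem stackW_append (n : Nat) (a b : List (List Char × List Int)) :
    stackW n (a ++ b) = stackW n a + stackW n b := by simp [stackW]

theorem stackW_reverse (n : Nat) (l : List (List Char × List Int)) :
    stackW n l.reverse = stackW n l := by simp [stackW]

theorem fooLoop_dec (cs : List Char) (pfx : List Char) (ii : List Int)
    (rest : List (List Char × List Int)) :
    stackW cs.length (((fooGroups (fooCs cs ii)).map (fun g => (pfx ++ [g.1], g.2))).reverse ++ rest)
      < stackW cs.length ((pfx, ii) :: rest) := by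
  rw [stackW_append, stackW_reverse]
  have h := childW_le cs ii
  have h2 : stackW cs.length ((fooGroups (fooCs cs ii)).map (fun g => (pfx ++ [g.1], g.2)))
      = ((fooGroups (fooCs cs ii)).map (fun g => 1 + sumW cs.length g.2)).sum := by
    simp only [stackW, List.map_map]; rfl
  simp only [stackW, List.map_cons, List.sum_cons] at *
  omega

-- the main while loop; stack top first (Python's list end);
-- fooLoop_dec above is the termination measure of the DFS
def fooLoop (cs : List Char) : List (List Char × List Int) → Int → Option String
  | [], _ => none
  | (pfx, ii) :: rest, k =>
      if k < (pfx.length : Int) then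
        (PySem.List.pyGet? pfx k).map (fun c => String.ofList [c])
      else
        fooLoop cs (((fooGroups (fooCs cs ii)).map (fun g => (pfx ++ [g.1], g.2))).reverse ++ rest)
          (k - pfx.length)
termination_by st _ => stackW cs.length st
decreasing_by exact fooLoop_dec cs pfx ii rest

def foo (text : String) (k : Int) : Option String :=
  fooLoop text.toList [([], PySem.List.pyRange 0 (text.toList.length : Int))] k

-- ===== PORT B =====

-- ===== PORT B =====
def fooScan : List (List Char) → Int → Option String
  | [], _ => none
  | s :: rest, k =>
      if k < (s.length : Int) then (PySem.List.pyGet? s k).map (fun c => String.ofList [c])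
      else fooScan rest (k - s.length)

def foo_alt (text : String) (k : Int) : Option String :=
  let cs := text.toList
  let n : Int := (cs.length : Int)
  let subs := (PySem.List.pyRange 0 n).flatMap
    (fun i => (PySem.List.pyRange (i + 1) (n + 1)).map (fun j => PySem.List.slice cs (some i) (some j)))
  fooScan (PySem.List.sorted (PySem.Set.ofList subs) (fun x => x)) k

-- ===== proof-side: the emission tree =====

-- ===== PRECONDITION & SPEC =====
-- Pre_foo excludes exactly k < 0: there Python A evaluates ""[k] on the first popped node and
-- raises IndexError (it returns on every k ≥ 0).
def Pre_foo (text : String) (k : Int) : Prop := 0 ≤ k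
instance (text : String) (k : Int) : Decidable (Pre_foo text k) := by unfold Pre_foo; infer_instance
def pvWitness_foo : String × Int := ("ab", 2)
def Spec_foo (text : String) (k : Int) (out : Option String) : Prop := out = foo_alt text k
instance (text : String) (k : Int) (out : Option String) : Decidable (Spec_foo text k out) := by unfold Spec_foo; infer_instance

-- ===== CLAIM (what is proved, stated in full; the proofs are below) =====
def Claim_equal_foo : Prop := ∀ (text : String) (k : Int), Dom_foo text k → Pre_foo text k → Spec_foo text k (foo text k)

-- ===== LEMMAS AND PROOFS =====
theorem group_sumW_lt (cs : List Char) (ii : List Int) {g : Char × List Int}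
    (hg : g ∈ fooGroups (fooCs cs ii)) : sumW cs.length g.2 < sumW cs.length ii := by
  have h := childW_le cs ii
  have h1 : 1 + sumW cs.length g.2 ≤ ((fooGroups (fooCs cs ii)).map (fun g => 1 + sumW cs.length g.2)).sum :=
    List.single_le_sum (l := (fooGroups (fooCs cs ii)).map (fun g => 1 + sumW cs.length g.2))
      (fun x _ => Nat.zero_le _) _ (List.mem_map_of_mem hg)
  omega

-- the main while loop; stack top first (Python's list end)

theorem flatMap_attach_val {α β : Type} (l : List α) (f : α → List β) :
    l.attach.flatMap (fun x => f x.1) = l.flatMap f := by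
  induction l with
  | nil => rfl
  | cons a t ih =>
      simp only [List.attach_cons, List.flatMap_cons, List.flatMap_map]
      rw [← ih]

def E (cs : List Char) (ii : List Int) : List (List Char) :=
  ((fooGroups (fooCs cs ii)).reverse.attach).flatMap
    (fun (g : {x // x ∈ (fooGroups (fooCs cs ii)).reverse}) =>
      [g.1.1] :: (E cs g.1.2).map (g.1.1 :: ·))
termination_by sumW cs.length ii
decreasing_by exact group_sumW_lt cs ii (List.mem_reverse.mp g.2)

theorem E_eq (cs : List Char) (ii : List Int) :
    E cs ii = (fooGroups (fooCs cs ii)).reverse.flatMap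
      (fun g => [g.1] :: (E cs g.2).map (g.1 :: ·)) := by
  rw [E]
  exact flatMap_attach_val ((fooGroups (fooCs cs ii)).reverse)
    (fun (g : Char × List Int) => [g.1] :: (E cs g.2).map (g.1 :: ·))

theorem fooScan_cons (s : List Char) (rest : List (List Char)) (k : Int) :
    fooScan (s :: rest) k = if k < (s.length : Int) then
      (PySem.List.pyGet? s k).map (fun c => String.ofList [c])
    else fooScan rest (k - s.length) := rfl

theorem E_ne_nil (cs : List Char) (ii : List Int) : ∀ s ∈ E cs ii, s ≠ [] := by
  rw [E_eq]
  intro s hs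
  rcases List.mem_flatMap.mp hs with ⟨g, _, hg2⟩
  simp only [List.mem_cons] at hg2
  rcases hg2 with h | h
  · simp [h]
  · obtain ⟨t, _, ht2⟩ := List.mem_map.mp h
    rw [← ht2]; simp

theorem loop_eq_scan (cs : List Char) :
    ∀ st k, fooLoop cs st k
      = fooScan (st.flatMap (fun nd => nd.1 :: (E cs nd.2).map (nd.1 ++ ·))) k := by
  intro st k
  induction st, k using fooLoop.induct cs with
  | case1 k => simp [fooLoop, fooScan]
  | case2 pfx ii rest k hk =>
      rw [fooLoop]
      simp only [List.flatMap_cons]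
      rw [List.cons_append, fooScan_cons]
      simp [hk]
  | case3 pfx ii rest k hk ih =>
      rw [fooLoop]
      simp only [List.flatMap_cons]
      rw [List.cons_append, fooScan_cons, if_neg hk, if_neg hk, ih]
      congr 1
      simp only [List.flatMap_append]
      congr 1
      rw [← List.map_reverse, List.flatMap_map, E_eq, List.map_flatMap]
      apply List.flatMap_congr
      intro g _
      simp only [List.map_cons, List.map_map]
      simp [Function.comp_def, List.append_assoc]

theorem charAt_eq (cs : List Char) (i : Int) (h0 : 0 ≤ i) (h1 : i.toNat < cs.length) :
    fooCharAt cs i = cs[i.toNat] := by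
  unfold fooCharAt
  obtain ⟨m, rfl⟩ : ∃ m : Nat, i = (m : Int) := ⟨i.toNat, by omega⟩
  rw [PySem.List.pyGet?_natCast]
  simp only [Int.toNat_natCast] at h1 ⊢
  simp [List.getElem?_eq_getElem h1]

theorem mem_fooCs (cs : List Char) (ii : List Int) (c : Char) (p : Int) :
    (c, p) ∈ fooCs cs ii ↔ ∃ i ∈ ii, i < (cs.length : Int) ∧ c = fooCharAt cs i ∧ p = i + 1 := by
  unfold fooCs
  rw [(PySem.List.sorted2_perm (fooPairs cs ii) (·.1) (·.2) true).mem_iff]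
  simp only [fooPairs, List.mem_map, List.mem_filter, Prod.mk.injEq, decide_eq_true_eq]
  constructor
  · rintro ⟨i, ⟨hi, hlt⟩, hc, hp⟩; exact ⟨i, hi, hlt, hc.symm, hp.symm⟩
  · rintro ⟨i, hi, hlt, hc, hp⟩; exact ⟨i, ⟨hi, hlt⟩, hc.symm, hp.symm⟩

theorem groups_mem_pairs : ∀ {l : List (Char × Int)} {c : Char} {ps : List Int} {p : Int},
    (c, ps) ∈ fooGroups l → p ∈ ps → (c, p) ∈ l := by
  intro l
  induction l using fooGroups.induct with
  | case1 => intro c ps p h; simp [fooGroups] at h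
  | case2 c0 p0 rest ih =>
      intro c ps p hg hp
      rw [fooGroups] at hg
      rcases List.mem_cons.mp hg with h | h
      · injection h with h1 h2
        subst h1; subst h2
        rcases List.mem_cons.mp hp with h | h
        · simp [h]
        · obtain ⟨q, hq1, hq2⟩ := List.mem_map.mp h
          have hqr : q ∈ rest := (List.takeWhile_sublist _).mem hq1
          have hqc : q.1 = c := by
            have := List.mem_takeWhile_imp hq1
            simpa using this
          right
          rw [show (c, p) = q by rw [← hqc, ← hq2]]
          exact hqr
      · have := ih h hp
        exact List.mem_cons_of_mem _ ((List.dropWhile_sublist _).mem this)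

theorem groups_ps_ne_nil : ∀ {l : List (Char × Int)} {c : Char} {ps : List Int},
    (c, ps) ∈ fooGroups l → ps ≠ [] := by
  intro l
  induction l using fooGroups.induct with
  | case1 => intro c ps h; simp [fooGroups] at h
  | case2 c0 p0 rest ih =>
      intro c ps hg
      rw [fooGroups] at hg
      rcases List.mem_cons.mp hg with h | h
      · injection h with h1 h2; subst h2; simp
      · exact ih h

theorem groups_exists : ∀ {l : List (Char × Int)} {c : Char} {p : Int},
    (c, p) ∈ l → ∃ ps, (c, ps) ∈ fooGroups l ∧ p ∈ ps := by
  intro l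
  induction l using fooGroups.induct with
  | case1 => intro c p h; simp at h
  | case2 c0 p0 rest ih =>
      intro c p hm
      rcases List.mem_cons.mp hm with h | h
      · injection h with h1 h2; subst h1; subst h2
        exact ⟨_, by rw [fooGroups]; exact List.mem_cons_self .., by simp⟩
      · rcases (List.takeWhile_append_dropWhile (p := fun (q : Char × Int) => q.1 == c0) (l := rest)) ▸ h with hsplit
        rcases List.mem_append.mp hsplit with h2 | h2
        · have hc : c = c0 := by
            have := List.mem_takeWhile_imp h2
            simpa using this
          subst hc
          refine ⟨_, by rw [fooGroups]; exact List.mem_cons_self .., ?_⟩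
          right
          exact List.mem_map_of_mem (f := (fun x => x.2)) h2
        · obtain ⟨ps, hps, hp⟩ := ih h2
          exact ⟨ps, by rw [fooGroups]; exact List.mem_cons_of_mem _ hps, hp⟩

theorem E_mem (cs : List Char) : ∀ (N : Nat) (ii : List Int), sumW cs.length ii ≤ N →
    (∀ i ∈ ii, 0 ≤ i) → ∀ s, s ∈ E cs ii ↔
      (s ≠ [] ∧ ∃ i ∈ ii, i < (cs.length : Int) ∧ s <+: cs.drop i.toNat) := by
  intro N
  induction N using Nat.strongRecOn with
  | _ N IH =>
    intro ii hN h0 s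
    rw [E_eq]
    constructor
    · intro hs
      obtain ⟨g, hg0, hsg⟩ := List.mem_flatMap.mp hs
      have hg : g ∈ fooGroups (fooCs cs ii) := List.mem_reverse.mp hg0
      have hps0 : ∀ p ∈ g.2, 0 ≤ p := by
        intro p hp
        obtain ⟨i, _, _, _, hp⟩ := (mem_fooCs cs ii g.1 p).mp (groups_mem_pairs hg hp)
        have := h0 i ‹i ∈ ii›
        omega
      rcases List.mem_cons.mp hsg with h | h
      · -- s = [g.1]
        obtain ⟨p, hp⟩ := List.exists_mem_of_ne_nil _ (groups_ps_ne_nil hg)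
        obtain ⟨i, hi, hlt, hc, _⟩ := (mem_fooCs cs ii g.1 p).mp (groups_mem_pairs hg hp)
        have hi0 := h0 i hi
        have hin : i.toNat < cs.length := by omega
        refine ⟨by simp [h], i, hi, hlt, ?_⟩
        rw [h, List.drop_eq_getElem_cons hin, List.cons_prefix_cons]
        exact ⟨by rw [hc, charAt_eq cs i hi0 hin], List.nil_prefix⟩
      · -- s = g.1 :: t with t ∈ E g.2
        obtain ⟨t, ht, rfl⟩ := List.mem_map.mp h
        have hlt' := group_sumW_lt cs ii hg
        obtain ⟨htne, p, hpmem, hplt, hpre⟩ :=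
          ((IH (sumW cs.length g.2) (by omega) g.2 le_rfl hps0 t).mp ht)
        obtain ⟨i, hi, hilt, hc, hp⟩ := (mem_fooCs cs ii g.1 p).mp (groups_mem_pairs hg hpmem)
        have hi0 := h0 i hi
        have hin : i.toNat < cs.length := by omega
        refine ⟨by simp, i, hi, hilt, ?_⟩
        rw [List.drop_eq_getElem_cons hin, List.cons_prefix_cons]
        refine ⟨by rw [hc, charAt_eq cs i hi0 hin], ?_⟩
        rw [show i.toNat + 1 = p.toNat by omega]
        exact hpre
    · rintro ⟨hne, i, hi, hilt, hpre⟩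
      have hi0 := h0 i hi
      have hin : i.toNat < cs.length := by omega
      obtain ⟨c, t, rfl⟩ : ∃ c t, s = c :: t := by
        cases s with
        | nil => exact absurd rfl hne
        | cons c t => exact ⟨c, t, rfl⟩
      rw [List.drop_eq_getElem_cons hin, List.cons_prefix_cons] at hpre
      obtain ⟨hc, hpre2⟩ := hpre
      have hmem : (c, i + 1) ∈ fooCs cs ii :=
        (mem_fooCs cs ii c (i + 1)).mpr ⟨i, hi, hilt, by rw [hc, charAt_eq cs i hi0 hin], rfl⟩
      obtain ⟨ps, hgps, hpmem⟩ := groups_exists hmem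
      have hps0 : ∀ p ∈ ps, 0 ≤ p := by
        intro p hp
        obtain ⟨j, hj, _, _, hp⟩ := (mem_fooCs cs ii c p).mp (groups_mem_pairs hgps hp)
        have := h0 j hj
        omega
      apply List.mem_flatMap.mpr
      refine ⟨(c, ps), List.mem_reverse.mpr hgps, ?_⟩
      by_cases htnil : t = []
      · subst htnil; exact List.mem_cons_self ..
      · apply List.mem_cons_of_mem
        apply List.mem_map_of_mem (f := (c :: ·))
        have hlt' : sumW cs.length ps < sumW cs.length ii := group_sumW_lt cs ii hgps
        apply (IH (sumW cs.length ps) (by omega) ps le_rfl hps0 t).mpr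
        refine ⟨htnil, i + 1, hpmem, ?_, ?_⟩
        · have h1 : t.length ≤ cs.length - (i.toNat + 1) := by
            have := hpre2.length_le
            simpa using this
          have h2 : 1 ≤ t.length := by
            cases t with
            | nil => exact absurd rfl htnil
            | cons a b => simp
          omega
        · rw [show (i + 1).toNat = i.toNat + 1 by omega]
          exact hpre2

theorem pairwise_insertBy {α : Type} (B : α → α → Bool) (R : α → α → Prop)
    (htrans : ∀ {a b c}, R a b → R b c → R a c)
    (h1 : ∀ x y, B x y = true → R x y) (h2 : ∀ x y, B x y = false → R y x)
    (x : α) : ∀ l : List α, l.Pairwise R → (PySem.List.insertBy B x l).Pairwise R := by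
  intro l hl
  induction l with
  | nil => rw [PySem.List.insertBy.eq_1]; exact List.pairwise_singleton ..
  | cons y ys ih =>
      rw [PySem.List.insertBy.eq_2]
      rcases hB : B x y with _ | _
      · rw [if_neg (by simp)]
        apply List.Pairwise.cons
        · intro z hz
          rcases (PySem.List.mem_insertBy B x z ys).mp hz with rfl | hz2
          · exact h2 _ _ hB
          · exact List.rel_of_pairwise_cons hl hz2
        · exact ih hl.tail
      · rw [if_pos rfl]
        apply List.Pairwise.cons
        · intro z hz
          rcases List.mem_cons.mp hz with rfl | hz2
          · exact h1 _ _ hB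
          · exact htrans (h1 _ _ hB) (List.rel_of_pairwise_cons hl hz2)
        · exact hl

theorem pairwise_foldl_insertBy {α : Type} (B : α → α → Bool) (R : α → α → Prop)
    (htrans : ∀ {a b c}, R a b → R b c → R a c)
    (h1 : ∀ x y, B x y = true → R x y) (h2 : ∀ x y, B x y = false → R y x) :
    ∀ (l acc : List α), acc.Pairwise R →
      (l.foldl (fun acc x => PySem.List.insertBy B x acc) acc).Pairwise R := by
  intro l
  induction l with
  | nil => intro acc h; exact h
  | cons x t ih =>
      intro acc h
      exact ih _ (pairwise_insertBy B R htrans h1 h2 x acc h)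

theorem fooCs_pairwise (cs : List Char) (ii : List Int) :
    (fooCs cs ii).Pairwise (fun a b => b.1 ≤ a.1) := by
  unfold fooCs PySem.List.sorted2
  simp only []
  rw [if_pos trivial]
  apply pairwise_foldl_insertBy _ (fun (a b : Char × Int) => b.1 ≤ a.1)
    (fun {a b c} h1 h2 => le_trans h2 h1) ?_ ?_ _ _ List.Pairwise.nil
  · intro x y h
    simp only [Bool.or_eq_true, Bool.and_eq_true, decide_eq_true_eq, Bool.not_eq_true',
      decide_eq_false_iff_not] at h
    rcases h with h | ⟨h, _⟩
    · exact le_of_lt h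
    · exact le_of_not_gt h
  · intro x y h
    simp only [Bool.or_eq_false_iff, Bool.and_eq_false_iff, decide_eq_false_iff_not] at h
    exact le_of_not_gt h.1

theorem groups_key_lt : ∀ {l : List (Char × Int)}, l.Pairwise (fun a b => b.1 ≤ a.1) →
    (fooGroups l).Pairwise (fun g h => h.1 < g.1) := by
  intro l
  induction l using fooGroups.induct with
  | case1 => intro _; simp [fooGroups]
  | case2 c0 p0 rest ih =>
      intro hp
      rw [fooGroups]
      constructor
      · intro g hg
        obtain ⟨p, hpm⟩ := List.exists_mem_of_ne_nil _ (groups_ps_ne_nil (c := g.1) (ps := g.2)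
          (by simpa using hg))
        have hmem : (g.1, p) ∈ (rest.dropWhile (fun q => q.1 == c0)) :=
          groups_mem_pairs (by simpa using hg) hpm
        -- every element of the dropWhile has fst < c0
        have hkey : ∀ q ∈ rest.dropWhile (fun q => q.1 == c0), q.1 < c0 := by
          cases hd : rest.dropWhile (fun q => q.1 == c0) with
          | nil => simp
          | cons h0 tl =>
              have hh0 : (h0.1 == c0) = false := by
                have := List.head?_dropWhile_not (fun q => q.1 == c0) rest
                rw [hd] at this
                simpa using this
              have hh0r : h0 ∈ rest := (List.dropWhile_sublist _).mem (by rw [hd]; simp)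
              have hh0le : h0.1 ≤ c0 := List.rel_of_pairwise_cons hp hh0r
              have hh0lt : h0.1 < c0 := lt_of_le_of_ne hh0le (by simpa using hh0)
              intro q hq
              rcases List.mem_cons.mp hq with rfl | hq2
              · exact hh0lt
              · have hdw : (h0 :: tl).Pairwise (fun a b => b.1 ≤ a.1) := by
                  rw [← hd]
                  exact hp.tail.sublist (List.dropWhile_sublist _)
                exact lt_of_le_of_lt (List.rel_of_pairwise_cons hdw hq2) hh0lt
        exact hkey _ hmem
      · exact ih (hp.tail.sublist (List.dropWhile_sublist _))

theorem lex_lt_of_head_lt {c c' : Char} (s t : List Char) (h : c < c') : (c :: s) < (c' :: t) := by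
  rw [show ((c :: s) < (c' :: t)) = ((c :: s).lt (c' :: t)) from rfl, List.lt_iff_lex_lt]
  exact List.Lex.rel h

theorem lex_lt_of_tail_lt (c : Char) {s t : List Char} (h : s < t) : (c :: s) < (c :: t) := by
  rw [show ((c :: s) < (c :: t)) = ((c :: s).lt (c :: t)) from rfl, List.lt_iff_lex_lt]
  exact List.Lex.cons (by rw [← List.lt_iff_lex_lt]; exact h)

theorem lex_singleton_lt (c : Char) {t : List Char} (h : t ≠ []) : [c] < (c :: t) := by
  rw [show (([c]) < (c :: t)) = (([c]).lt (c :: t)) from rfl, List.lt_iff_lex_lt]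
  refine List.Lex.cons ?_
  cases t with
  | nil => exact absurd rfl h
  | cons a b => exact List.Lex.nil

theorem block_head (cs : List Char) (ps : List Int) (c : Char) :
    ∀ s ∈ ([c] :: (E cs ps).map (c :: ·)), ∃ t, s = c :: t := by
  intro s hs
  rcases List.mem_cons.mp hs with rfl | h
  · exact ⟨[], rfl⟩
  · obtain ⟨t, _, rfl⟩ := List.mem_map.mp h
    exact ⟨t, rfl⟩

theorem E_sorted (cs : List Char) : ∀ (N : Nat) (ii : List Int), sumW cs.length ii ≤ N →
    (E cs ii).Pairwise (· < ·) := by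
  intro N
  induction N using Nat.strongRecOn with
  | _ N IH =>
    intro ii hN
    rw [E_eq, List.flatMap_def, List.pairwise_flatten]
    constructor
    · intro blk hblk
      obtain ⟨g, hg, rfl⟩ := List.mem_map.mp hblk
      have hglt : sumW cs.length g.2 < sumW cs.length ii :=
        group_sumW_lt cs ii (List.mem_reverse.mp hg)
      have hE : (E cs g.2).Pairwise (· < ·) := IH (sumW cs.length g.2) (by omega) g.2 le_rfl
      apply List.Pairwise.cons
      · intro y hy
        obtain ⟨t, ht, rfl⟩ := List.mem_map.mp hy
        exact lex_singleton_lt g.1 (E_ne_nil cs g.2 t ht)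
      · exact List.pairwise_map.mpr (hE.imp (fun h => lex_lt_of_tail_lt g.1 h))
    · rw [List.pairwise_map]
      have hasc : ((fooGroups (fooCs cs ii)).reverse).Pairwise (fun g h => g.1 < h.1) := by
        rw [List.pairwise_reverse]
        exact groups_key_lt (fooCs_pairwise cs ii)
      apply hasc.imp
      intro g h hlt x hx y hy
      obtain ⟨t1, rfl⟩ := block_head cs g.2 g.1 x hx
      obtain ⟨t2, rfl⟩ := block_head cs h.2 h.1 y hy
      exact lex_lt_of_head_lt t1 t2 hlt

theorem mem_subs (cs : List Char) (x : List Char) :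
    (x ∈ (PySem.List.pyRange 0 (cs.length : Int)).flatMap
        (fun i => (PySem.List.pyRange (i + 1) ((cs.length : Int) + 1)).map
          (fun j => PySem.List.slice cs (some i) (some j))))
    ↔ (x ≠ [] ∧ ∃ i ∈ PySem.List.pyRange 0 (cs.length : Int),
        i < (cs.length : Int) ∧ x <+: cs.drop i.toNat) := by
  simp only [List.mem_flatMap, List.mem_map, PySem.List.mem_pyRange_one]
  constructor
  · rintro ⟨i, ⟨hi0, hin⟩, j, ⟨hj1, hj2⟩, rfl⟩
    have hs : PySem.List.slice cs (some i) (some j) = (cs.drop i.toNat).take (j.toNat - i.toNat) := by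
      rw [show i = ((i.toNat : Nat) : Int) by omega, show j = ((j.toNat : Nat) : Int) by omega,
        PySem.List.slice_natCast]
      simp only [Int.toNat_natCast]
    refine ⟨?_, i, ⟨hi0, hin⟩, hin, hs ▸ List.take_prefix _ _⟩
    rw [hs]
    intro hnil
    have hlen := congrArg List.length hnil
    simp only [List.length_take, List.length_drop, List.length_nil] at hlen
    omega
  · rintro ⟨hne, i, ⟨hi0, hin⟩, _, hpre⟩
    have hx1 : 1 ≤ x.length := by
      cases x with
      | nil => exact absurd rfl hne
      | cons a b => simp
    have hxle : x.length ≤ cs.length - i.toNat := by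
      have := hpre.length_le
      simpa using this
    refine ⟨i, ⟨hi0, hin⟩, i + x.length, ⟨by omega, by omega⟩, ?_⟩
    rw [show i = ((i.toNat : Nat) : Int) by omega,
      show (((i.toNat : Nat) : Int) + x.length) = ((i.toNat + x.length : Nat) : Int) by push_cast; ring,
      PySem.List.slice_natCast]
    rw [show i.toNat + x.length - i.toNat = x.length by omega]
    exact (List.prefix_iff_eq_take.mp hpre).symm

theorem sorted_bridge (xs : List (List Char)) :
    PySem.List.sorted xs (fun x => x)
      = @PySem.List.sorted (List Char) (List Char) List.instLinearOrder.toLT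
          LinearOrder.toDecidableLT xs (fun x => x) false := by
  show List.foldl _ [] xs = List.foldl _ [] xs
  congr 1
  funext acc x
  congr 1
  funext a b
  simp only [if_neg (by decide : ¬ (false = true))]
  apply decide_eq_decide.mpr
  exact Iff.rfl

theorem sorted_subs_eq_E (text : String) :
    PySem.List.sorted
      (PySem.Set.ofList ((PySem.List.pyRange 0 (text.toList.length : Int)).flatMap
        (fun i => (PySem.List.pyRange (i + 1) ((text.toList.length : Int) + 1)).map
          (fun j => PySem.List.slice text.toList (some i) (some j)))))
      (fun x => x)
    = E text.toList (PySem.List.pyRange 0 (text.toList.length : Int)) := by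
  set cs := text.toList
  set ii := PySem.List.pyRange 0 (cs.length : Int) with hii
  have h0 : ∀ i ∈ ii, 0 ≤ i := by
    intro i hi
    exact (PySem.List.mem_pyRange_one.mp hi).1
  have hEmem := E_mem cs (sumW cs.length ii) ii le_rfl h0
  have hEsort : (E cs ii).Pairwise (· < ·) := E_sorted cs (sumW cs.length ii) ii le_rfl
  have hEnodup : (E cs ii).Nodup := hEsort.imp ne_of_lt
  rw [sorted_bridge]
  apply PySem.List.sorted_eq_of_perm_of_pairwise_lt
  · rw [List.perm_ext_iff_of_nodup hEnodup (PySem.Set.nodup_ofList _)]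
    intro x
    rw [PySem.Set.mem_ofList, hEmem x, mem_subs]
  · exact hEsort

theorem foo_eq (text : String) (k : Int) (hk : 0 ≤ k) : foo text k = foo_alt text k := by
  unfold foo foo_alt
  dsimp only
  rw [loop_eq_scan]
  simp only [List.flatMap_cons, List.flatMap_nil, List.append_nil, List.nil_append]
  rw [sorted_subs_eq_E]
  rw [fooScan_cons]
  rw [if_neg (by simp; omega)]
  simp [List.map_id']

-- ===== VERDICT (by name: the statement is the Claim_ definition above) =====
theorem foo_spec : Claim_equal_foo := by
  intro text k _ hk
  exact foo_eq text k hk
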